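-- pv_equiv track=rewrite | github.com/tsyu12345/Paiza-Python-SkillCheck | A066.py | calc_continuous_work
-- ===== SOURCE A (Python) =====
-- def calc_continuous_work(datas: list[list[int]]) -> list[int]:
--
--     continuous_counts: list[int] = []
--
--     for i, data in enumerate(datas):
--         continuous_count: int = 0
--         st_day = data[0]
--         end_day = data[1]
--         for j in range(i+1, len(datas)):#どこまで連続しているか調査
--             next_st_day = datas[j][0]
--             next_end_day = datas[j][1]
--             if next_st_day - end_day == 1 or next_st_day == end_day or next_end_day - end_day == 1:
--                 end_day = next_end_day
--             else:
--                 break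
--         continuous_count = end_day - st_day + 1
--         continuous_counts.append(continuous_count)
--
--     return continuous_counts
-- ===== SOURCE B (Python) =====
-- def calc_continuous_work(datas: list[list[int]]) -> list[int]:
--     # Right-to-left DP: the chain starting at i ends where the chain at i+1 ends,
--     # whenever the link i -> i+1 holds.
--     n = len(datas)
--     res = [0] * n
--     reach = 0  # final end_day of the chain starting at i+1
--     for i in range(n - 1, -1, -1):
--         end = datas[i][1]
--         if i + 1 < n:
--             ns, ne = datas[i + 1][0], datas[i + 1][1]
--             if ns - end == 1 or ns == end or ne - end == 1:
--                 end = reach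
--         reach = end
--         res[i] = end - datas[i][0] + 1
--     return res
-- ===== Notes on version B (the rewrite author's own statement) =====
-- stated objective: alternative
-- what changed: Replaces the per-row forward chain scan (worst-case quadratic) by a single right-to-left dynamic-programming pass that reuses the already-computed chain endpoint of the next row; same measured speed on random inputs, where chains are short.
import Mathlib
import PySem

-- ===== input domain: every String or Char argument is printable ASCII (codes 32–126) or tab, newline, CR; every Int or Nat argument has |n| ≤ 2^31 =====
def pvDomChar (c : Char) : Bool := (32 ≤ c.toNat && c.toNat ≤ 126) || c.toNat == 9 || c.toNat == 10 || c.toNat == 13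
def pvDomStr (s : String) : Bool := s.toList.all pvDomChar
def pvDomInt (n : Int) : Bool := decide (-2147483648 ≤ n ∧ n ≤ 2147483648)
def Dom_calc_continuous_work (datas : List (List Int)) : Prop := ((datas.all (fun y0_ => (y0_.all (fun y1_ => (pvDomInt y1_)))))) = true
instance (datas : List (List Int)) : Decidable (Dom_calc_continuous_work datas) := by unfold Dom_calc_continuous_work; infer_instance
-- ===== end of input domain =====

-- ===== PORT A =====
-- B: one right-to-left DP pass instead of A's per-row forward chain scan.
-- Inner loop of A: walk forward from the row after i, extending end_day while the link holds.
def pvInnerA (endDay : Int) : List (List Int) → Int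
  | [] => endDay
  | row :: rest =>
    let ns := PySem.List.pyGetD row 0 0
    let ne := PySem.List.pyGetD row 1 0
    if ns - endDay = 1 ∨ ns = endDay ∨ ne - endDay = 1 then pvInnerA ne rest else endDay

def calc_continuous_work : List (List Int) → List Int
  | [] => []
  | data :: rest =>
    (pvInnerA (PySem.List.pyGetD data 1 0) rest - PySem.List.pyGetD data 0 0 + 1)
      :: calc_continuous_work rest

-- ===== PORT B =====
-- Right-to-left DP (Source B's backwards loop as structural recursion): returns
-- (final end_day of the chain starting at the first row, the result list).
def pvGoB : List (List Int) → Int × List Int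
  | [] => (0, [])
  | d :: rest =>
    let e := PySem.List.pyGetD d 1 0
    match rest with
    | [] => (e, [e - PySem.List.pyGetD d 0 0 + 1])
    | d2 :: _ =>
      let p := pvGoB rest
      let ns := PySem.List.pyGetD d2 0 0
      let ne := PySem.List.pyGetD d2 1 0
      let e' := if ns - e = 1 ∨ ns = e ∨ ne - e = 1 then p.1 else e
      (e', (e' - PySem.List.pyGetD d 0 0 + 1) :: p.2)

def calc_continuous_work_alt (datas : List (List Int)) : List Int :=
  (pvGoB datas).2

-- ===== PRECONDITION & SPEC =====
-- Python A indexes data[0] and data[1] of every row, so it raises IndexError on any row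
-- shorter than 2 elements; Pre_ excludes exactly those inputs.
def Pre_calc_continuous_work (datas : List (List Int)) : Prop :=
  ∀ r ∈ datas, 2 ≤ r.length
instance (datas : List (List Int)) : Decidable (Pre_calc_continuous_work datas) := by
  unfold Pre_calc_continuous_work; infer_instance

def pvWitness_calc_continuous_work : List (List Int) := [[1, 2], [3, 4], [6, 7]]

def Spec_calc_continuous_work (datas : List (List Int)) (out : List Int) : Prop := out = calc_continuous_work_alt datas
instance (datas : List (List Int)) (out : List Int) : Decidable (Spec_calc_continuous_work datas out) := by unfold Spec_calc_continuous_work; infer_instance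

-- ===== CLAIM (what is proved, stated in full; the proofs are below) =====
def Claim_equal_calc_continuous_work : Prop := ∀ (datas : List (List Int)), Dom_calc_continuous_work datas → Pre_calc_continuous_work datas → Spec_calc_continuous_work datas (calc_continuous_work datas)

-- ===== LEMMAS AND PROOFS =====
-- Key invariant: the DP's carried endpoint for a nonempty suffix equals A's forward scan
-- started at that suffix's head.
theorem pvGoB_fst (d : List Int) (rest : List (List Int)) :
    (pvGoB (d :: rest)).1 = pvInnerA (PySem.List.pyGetD d 1 0) rest := by
  induction rest generalizing d with
  | nil => simp [pvGoB, pvInnerA]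
  | cons d2 rest ih =>
    simp only [pvGoB, pvInnerA]
    split
    · exact ih d2
    · rfl

theorem calc_eq_goB_snd (datas : List (List Int)) :
    calc_continuous_work datas = (pvGoB datas).2 := by
  induction datas with
  | nil => rfl
  | cons d rest ih =>
    cases rest with
    | nil => simp [calc_continuous_work, pvGoB, pvInnerA]
    | cons d2 rest' =>
      have hsnd : (pvGoB (d :: d2 :: rest')).2
          = ((pvGoB (d :: d2 :: rest')).1 - PySem.List.pyGetD d 0 0 + 1)
              :: (pvGoB (d2 :: rest')).2 := rfl
      rw [hsnd, pvGoB_fst, ← ih]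
      rfl

-- ===== VERDICT (by name: the statement is the Claim_ definition above) =====
theorem calc_continuous_work_spec : Claim_equal_calc_continuous_work := by
  intro datas _ _
  unfold Spec_calc_continuous_work calc_continuous_work_alt
  exact calc_eq_goB_snd datas
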